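-- pv_equiv track=rewrite | github.com/omersaskan/Qar_imageProccesing | modules/operations/capture_profile.py | parse_profile_key
-- ===== SOURCE A (Python) =====
-- from enum import Enum
-- from typing import Any, Dict, Optional, Tuple
--
-- class SizeClass(str, Enum):
--     SMALL = "small"        # ≤ 30 cm
--     MEDIUM = "medium"      # 30 cm – 2 m
--     LARGE = "large"        # > 2 m
--
-- class SceneType(str, Enum):
--     ON_SURFACE = "on_surface"      # masa/tepsi üstü
--     FREESTANDING = "freestanding"  # yerde durduğu yerde duran obje
--     MOUNTED = "mounted"            # duvara/tavana sabit
--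
-- def parse_profile_key(key: str) -> Tuple[SizeClass, SceneType]:
--     """
--     Parse compact strings like 'small_on_surface', 'large_freestanding', or
--     'large__mounted'.  Falls back to (SMALL, ON_SURFACE) on garbage input.
--     """
--     if not key:
--         return SizeClass.SMALL, SceneType.ON_SURFACE
--     k = key.lower().strip().replace("__", "_")
--     for size in SizeClass:
--         if k.startswith(size.value + "_"):
--             tail = k[len(size.value) + 1:]
--             for scene in SceneType:
--                 if scene.value == tail:
--                     return size, scene
--     return SizeClass.SMALL, SceneType.ON_SURFACE
-- ===== SOURCE B (Python) =====
-- from enum import Enum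
-- from typing import Tuple
--
-- class SizeClass(str, Enum):
--     SMALL = "small"
--     MEDIUM = "medium"
--     LARGE = "large"
--
-- class SceneType(str, Enum):
--     ON_SURFACE = "on_surface"
--     FREESTANDING = "freestanding"
--     MOUNTED = "mounted"
--
-- _SIZES = {s.value: s for s in SizeClass}
-- _SCENES = {sc.value: sc for sc in SceneType}
--
-- def parse_profile_key(key: str) -> Tuple[SizeClass, SceneType]:
--     """Split once at the first '_' and use two lookup tables instead of nested scans."""
--     if not key:
--         return SizeClass.SMALL, SceneType.ON_SURFACE
--     k = key.lower().strip().replace("__", "_")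
--     head, sep, tail = k.partition("_")
--     if sep:
--         size = _SIZES.get(head)
--         scene = _SCENES.get(tail)
--         if size is not None and scene is not None:
--             return size, scene
--     return SizeClass.SMALL, SceneType.ON_SURFACE
-- ===== Notes on version B (the rewrite author's own statement) =====
-- stated objective: simpler
-- what changed: Replaces A's nested enum scans (prefix test per size, equality scan per scene) with a single partition at the first underscore followed by two precomputed dict lookups.
import Mathlib
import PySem

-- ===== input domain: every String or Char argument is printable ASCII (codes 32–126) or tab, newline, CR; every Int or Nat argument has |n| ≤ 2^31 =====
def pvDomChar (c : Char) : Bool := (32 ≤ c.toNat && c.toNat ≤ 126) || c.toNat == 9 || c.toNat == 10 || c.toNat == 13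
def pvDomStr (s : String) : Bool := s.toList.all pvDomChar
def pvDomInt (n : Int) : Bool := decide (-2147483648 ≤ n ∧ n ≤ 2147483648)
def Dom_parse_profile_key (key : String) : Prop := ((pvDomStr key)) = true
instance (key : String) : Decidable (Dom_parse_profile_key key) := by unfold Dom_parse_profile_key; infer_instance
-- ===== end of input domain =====

-- B replaces A's nested enum scans with one partition at the first '_' plus two table lookups (objective: simpler).


-- ===== PORT A =====
-- inner loop: 'for scene in SceneType: if scene.value == tail: return size, scene'
def pkScanScenes (tail : String) : List String → Option String
  | [] => none
  | sc :: rest => if sc = tail then some sc else pkScanScenes tail rest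

-- outer loop: 'for size in SizeClass: if k.startswith(size.value + "_"): …'
def pkScanSizes (k : String) : List String → Option (String × String)
  | [] => none
  | s :: rest =>
    if PySem.Str.startswith k (s ++ "_") then
      let tail := PySem.Str.slice k (some ((PySem.Str.len s : Int) + 1)) none
      match pkScanScenes tail ["on_surface", "freestanding", "mounted"] with
      | some sc => pure (s, sc)
      | none => pkScanSizes k rest
    else pkScanSizes k rest

-- the outer loop's result, then the shared fallback
def pkBodyA (k : String) : String × String :=
  match pkScanSizes k ["small", "medium", "large"] with
  | some r => r
  | none => ("small", "on_surface")

def parse_profile_key (key : String) : String × String :=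
  if key = "" then ("small", "on_surface")
  else pkBodyA (PySem.Str.replace (PySem.Str.strip (PySem.Str.lower key)) "__" "_")

-- ===== PORT B =====
-- hand port of k.partition("_"): none = separator absent; some (head, tail) with
-- head the part before the FIRST '_' and tail the rest (exact for the 1-char separator used here)
def pkPartitionU : List Char → Option (List Char × List Char)
  | [] => none
  | c :: rest =>
    if c = '_' then some ([], rest)
    else
      match pkPartitionU rest with
      | some (h, t) => some (c :: h, t)
      | none => none

def pkSizes : PySem.Dict String String :=
  PySem.Dict.ofList [("small", "small"), ("medium", "medium"), ("large", "large")]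

def pkScenes : PySem.Dict String String :=
  PySem.Dict.ofList [("on_surface", "on_surface"), ("freestanding", "freestanding"), ("mounted", "mounted")]

-- partition then two dict lookups
def pkBodyB (k : String) : String × String :=
  match pkPartitionU k.toList with
  | some (h, t) =>
    match PySem.Dict.get? pkSizes (String.ofList h), PySem.Dict.get? pkScenes (String.ofList t) with
    | some s, some sc => (s, sc)
    | _, _ => ("small", "on_surface")
  | none => ("small", "on_surface")

def parse_profile_key_alt (key : String) : String × String :=
  if key = "" then ("small", "on_surface")
  else pkBodyB (PySem.Str.replace (PySem.Str.strip (PySem.Str.lower key)) "__" "_")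

-- ===== PRECONDITION & SPEC =====
def Spec_parse_profile_key (key : String) (out : String × String) : Prop := out = parse_profile_key_alt key
instance (key : String) (out : String × String) : Decidable (Spec_parse_profile_key key out) := by unfold Spec_parse_profile_key; infer_instance

-- ===== CLAIM (what is proved, stated in full; the proofs are below) =====
def Claim_equal_parse_profile_key : Prop := ∀ (key : String), Dom_parse_profile_key key → Spec_parse_profile_key key (parse_profile_key key)

-- ===== LEMMAS AND PROOFS =====

-- pkPartitionU finds the split at the FIRST '_' (characterisation lemmas)
theorem pkPart_none : ∀ {l : List Char}, pkPartitionU l = none → '_' ∉ l := by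
  intro l
  induction l with
  | nil => intro _; simp
  | cons c rest ih =>
    intro hl
    by_cases hc : c = '_'
    · simp [pkPartitionU, hc] at hl
    · have hrest : pkPartitionU rest = none := by
        cases hr : pkPartitionU rest with
        | none => rfl
        | some p => obtain ⟨h, t⟩ := p; simp [pkPartitionU, hc, hr] at hl
      have := ih hrest
      simp only [List.mem_cons, not_or]
      exact ⟨fun he => hc he.symm, this⟩

theorem pkPart_some : ∀ {l h t : List Char}, pkPartitionU l = some (h, t) →
    l = h ++ '_' :: t ∧ '_' ∉ h := by
  intro l
  induction l with
  | nil => intro h t hl; simp [pkPartitionU] at hl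
  | cons c rest ih =>
    intro h t hl
    by_cases hc : c = '_'
    · simp [pkPartitionU, hc] at hl
      obtain ⟨hh, ht⟩ := hl
      subst hh; subst ht; simp [hc]
    · cases hr : pkPartitionU rest with
      | none => simp [pkPartitionU, hc, hr] at hl
      | some p =>
        obtain ⟨h', t'⟩ := p
        simp [pkPartitionU, hc, hr] at hl
        obtain ⟨hh, ht⟩ := hl
        obtain ⟨hrest, hnot⟩ := ih hr
        subst hh; subst ht
        constructor
        · simp [hrest]
        · simp only [List.mem_cons, not_or]
          exact ⟨fun he => hc he.symm, hnot⟩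

-- uniqueness of the first-'_' decomposition: a size prefix must equal the head
theorem pk_prefix_eq : ∀ {s h : List Char} {t : List Char}, '_' ∉ s → '_' ∉ h →
    s ++ ['_'] <+: h ++ '_' :: t → s = h := by
  intro s
  induction s with
  | nil =>
    intro h t _ hh hp
    cases h with
    | nil => rfl
    | cons c h' =>
      obtain ⟨r, hr⟩ := hp
      simp at hr
      exact absurd (List.mem_cons.mpr (Or.inl hr.1)) hh
  | cons a s' ih =>
    intro h t hs hh hp
    cases h with
    | nil =>
      obtain ⟨r, hr⟩ := hp
      simp at hr
      exact absurd (List.mem_cons.mpr (Or.inl hr.1.symm)) hs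
    | cons c h' =>
      obtain ⟨r, hr⟩ := hp
      simp at hr
      obtain ⟨hac, hrest⟩ := hr
      have hs' : '_' ∉ s' := fun hm => hs (List.mem_cons_of_mem _ hm)
      have hh' : '_' ∉ h' := fun hm => hh (List.mem_cons_of_mem _ hm)
      have : s' = h' := ih hs' hh' ⟨r, by simpa using hrest⟩
      simp [hac, this]

-- A's startswith test, under the first-'_' decomposition of k
theorem pk_starts_iff (k : String) (h t : List Char) (hk : k.toList = h ++ '_' :: t)
    (hh : '_' ∉ h) (s : String) (hs : '_' ∉ s.toList) :
    PySem.Str.startswith k (s ++ "_") = true ↔ s.toList = h := by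
  constructor
  · intro hst
    have hp : (s ++ "_").toList <+: k.toList := by
      simpa [PySem.Chars.startswith_iff] using hst
    rw [hk] at hp
    simp only [String.toList_append] at hp
    exact pk_prefix_eq hs hh (by simpa using hp)
  · intro he
    have : (s ++ "_").toList <+: k.toList := by
      rw [hk]
      simp only [String.toList_append]
      refine ⟨t, ?_⟩
      simp [he]
    simpa [PySem.Chars.startswith_iff] using this

-- A's tail slice is exactly the partition tail
theorem pk_tail_eq (k : String) (h t : List Char) (hk : k.toList = h ++ '_' :: t)
    (s : String) (he : s.toList = h) :
    PySem.Str.slice k (some ((PySem.Str.len s : Int) + 1)) none = String.ofList t := by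
  rw [String.ext_iff]
  have h1 : (PySem.Str.len s : Int) + 1 = ((s.toList.length + 1 : Nat) : Int) := by simp
  rw [h1]
  simp only [PySem.Str.toList_slice, PySem.Chars.slice_eq_listSlice,
    PySem.List.slice_from_natCast, String.toList_ofList, hk, he]
  rw [List.drop_append]
  simp

theorem pkSizes_mk : pkSizes = PySem.Dict.mk
    [("small", "small"), ("medium", "medium"), ("large", "large")] := by decide

theorem pkScenes_mk : pkScenes = PySem.Dict.mk
    [("on_surface", "on_surface"), ("freestanding", "freestanding"), ("mounted", "mounted")] := by decide

-- both scene searches give the same answer on the same tail string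
theorem pk_scene_eq (tail : String) :
    pkScanScenes tail ["on_surface", "freestanding", "mounted"] = PySem.Dict.get? pkScenes tail := by
  rw [pkScenes_mk]
  simp only [pkScanScenes, PySem.Dict.get?_mk_cons, beq_iff_eq]
  split_ifs <;> rfl

theorem pk_core (k : String) : pkBodyA k = pkBodyB k := by
  unfold pkBodyA pkBodyB
  cases hp : pkPartitionU k.toList with
  | none =>
    have hnu : '_' ∉ k.toList := pkPart_none hp
    have hf : ∀ s : String, ¬ (PySem.Str.startswith k (s ++ "_") = true) := by
      intro s hb
      have hpre : (s ++ "_").toList <+: k.toList := by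
        simpa [PySem.Chars.startswith_iff] using hb
      exact absurd (hpre.subset (by simp)) hnu
    simp only [pkScanSizes]
    rw [if_neg (hf "small"), if_neg (hf "medium"), if_neg (hf "large")]
  | some p =>
    obtain ⟨h, t⟩ := p
    obtain ⟨hk, hh⟩ := pkPart_some hp
    have hsw : ∀ s : String, '_' ∉ s.toList →
        (PySem.Str.startswith k (s ++ "_") = true ↔ s.toList = h) :=
      fun s hs => pk_starts_iff k h t hk hh s hs
    have hsf : ∀ s : String, '_' ∉ s.toList → s.toList ≠ h →
        ¬ (PySem.Str.startswith k (s ++ "_") = true) :=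
      fun s hs hne hb => absurd ((hsw s hs).mp hb) hne
    by_cases h1 : h = "small".toList
    · subst h1
      have hs1 : PySem.Str.startswith k ("small" ++ "_") = true :=
        (hsw "small" (by decide)).mpr rfl
      have hn2 := hsf "medium" (by decide) (by decide)
      have hn3 := hsf "large" (by decide) (by decide)
      have ht := pk_tail_eq k _ t hk "small" rfl
      simp only [pkScanSizes]
      rw [if_pos hs1, if_neg hn2, if_neg hn3, ht, pk_scene_eq, pkSizes_mk]
      cases hsc : pkScenes.get? (String.ofList t) <;>
        simp [PySem.Dict.get?_mk_cons]
    · by_cases h2 : h = "medium".toList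
      · subst h2
        have hs2 : PySem.Str.startswith k ("medium" ++ "_") = true :=
          (hsw "medium" (by decide)).mpr rfl
        have hn1 := hsf "small" (by decide) (by decide)
        have hn3 := hsf "large" (by decide) (by decide)
        have ht := pk_tail_eq k _ t hk "medium" rfl
        simp only [pkScanSizes]
        rw [if_neg hn1, if_pos hs2, if_neg hn3, ht, pk_scene_eq, pkSizes_mk]
        cases hsc : pkScenes.get? (String.ofList t) <;>
          simp [PySem.Dict.get?_mk_cons]
      · by_cases h3 : h = "large".toList
        · subst h3
          have hs3 : PySem.Str.startswith k ("large" ++ "_") = true :=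
            (hsw "large" (by decide)).mpr rfl
          have hn1 := hsf "small" (by decide) (by decide)
          have hn2 := hsf "medium" (by decide) (by decide)
          have ht := pk_tail_eq k _ t hk "large" rfl
          simp only [pkScanSizes]
          rw [if_neg hn1, if_neg hn2, if_pos hs3, ht, pk_scene_eq, pkSizes_mk]
          cases hsc : pkScenes.get? (String.ofList t) <;>
            simp [PySem.Dict.get?_mk_cons]
        · have hn1 := hsf "small" (by decide) (fun he => h1 he.symm)
          have hn2 := hsf "medium" (by decide) (fun he => h2 he.symm)
          have hn3 := hsf "large" (by decide) (fun he => h3 he.symm)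
          have hne1 : ¬ (("small" : String) = String.ofList h) := by
            intro he
            exact h1 (by simpa [String.ext_iff] using he.symm)
          have hne2 : ¬ (("medium" : String) = String.ofList h) := by
            intro he
            exact h2 (by simpa [String.ext_iff] using he.symm)
          have hne3 : ¬ (("large" : String) = String.ofList h) := by
            intro he
            exact h3 (by simpa [String.ext_iff] using he.symm)
          simp only [pkScanSizes]
          rw [if_neg hn1, if_neg hn2, if_neg hn3, pkSizes_mk]
          simp [hne1, hne2, hne3, PySem.Dict.get?]

-- ===== VERDICT (by name: the statement is the Claim_ definition above) =====
theorem parse_profile_key_spec : Claim_equal_parse_profile_key := by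
  intro key _
  unfold Spec_parse_profile_key parse_profile_key parse_profile_key_alt
  by_cases h : key = ""
  · simp only [if_pos h]
  · simp only [if_neg h]
    exact pk_core _
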